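-- pv_equiv track=rewrite | github.com/Abasz/ESPRowingMonitor | tools/calibration-helper/calibration-helper-GUI.py | _get_datapoint_distribution
-- ===== SOURCE A (Python) =====
-- def _get_datapoint_distribution(handle_forces: list) -> list:
--     """Get distribution of datapoint counts (how many strokes have each count).
--
--     Args:
--         handle_forces: List of force curves
--
--     Returns:
--         List of (datapoint_count, frequency) tuples, sorted by datapoint_count
--     """
--     if not handle_forces:
--         return []
--
--     counts = [len(forces) for forces in handle_forces]
--
--     # Count frequency of each datapoint count
--     from collections import Counter
--     freq = Counter(counts)
--
--     # Sort by datapoint count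
--     distribution = sorted(freq.items())
--
--     return distribution
-- ===== SOURCE B (Python) =====
-- def _get_datapoint_distribution(handle_forces: list) -> list:
--     """Distribution of force-curve lengths via sort-then-group (no Counter/dict):
--     sort the lengths once, then emit one (length, run_length) tuple per run of
--     equal adjacent values; the result is already sorted by datapoint count."""
--     if not handle_forces:
--         return []
--
--     lengths = sorted(len(forces) for forces in handle_forces)
--
--     distribution = []
--     rest = lengths
--     while rest:
--         x = rest[0]
--         run = 1
--         while run < len(rest) and rest[run] == x:
--             run += 1
--         distribution.append((x, run))
--         rest = rest[run:]
--     return distribution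
-- ===== Notes on version B (the rewrite author's own statement) =====
-- stated objective: idiomatic
-- what changed: B replaces the Counter hash-accumulation followed by sorting the (key, count) items with a sort of the raw length list and a single run-length scan that groups equal adjacent values, so counts come from run lengths and no dict/Counter is built.
import Mathlib
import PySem

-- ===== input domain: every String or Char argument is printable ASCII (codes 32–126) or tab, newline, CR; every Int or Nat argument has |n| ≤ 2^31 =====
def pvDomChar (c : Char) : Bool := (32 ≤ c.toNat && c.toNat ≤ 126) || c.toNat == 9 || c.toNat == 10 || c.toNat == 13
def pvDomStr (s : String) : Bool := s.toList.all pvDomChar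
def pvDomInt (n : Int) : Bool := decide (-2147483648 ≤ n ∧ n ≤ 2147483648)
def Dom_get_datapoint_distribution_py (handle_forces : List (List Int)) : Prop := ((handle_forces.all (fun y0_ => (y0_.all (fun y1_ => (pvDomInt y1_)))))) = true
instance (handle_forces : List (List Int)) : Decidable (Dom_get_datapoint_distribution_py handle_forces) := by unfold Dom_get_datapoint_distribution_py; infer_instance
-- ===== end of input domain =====

-- B replaces A's Counter + sort-of-items with sort-the-lengths + one run-length grouping scan (idiomatic; no dict).

-- ===== PORT A =====
-- counts = [len(forces) for forces in handle_forces]; freq = Counter(counts); sorted(freq.items())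
def get_datapoint_distribution_py (handle_forces : List (List Int)) : List (Int × Int) :=
  if handle_forces = [] then []
  else
    let counts : List Int := handle_forces.map (fun forces => (forces.length : Int))
    let freq := PySem.Dict.counter counts
    -- sorted(freq.items()) compares the (count, frequency) tuples lexicographically
    PySem.List.sorted2 freq.items (fun p => p.1) (fun p => p.2)

-- ===== PORT B =====
-- the outer while-loop of Source B: one (value, run length) tuple per run of equal adjacent values
def pvRunsB (l : List Int) : List (Int × Int) :=
  match l with
  | [] => []
  | x :: xs =>
      -- run = 1 + number of immediately following elements equal to x; rest = lengths[run:]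
      (x, 1 + ((xs.takeWhile (fun y => y == x)).length : Int)) :: pvRunsB (xs.dropWhile (fun y => y == x))
termination_by l.length
decreasing_by
  simpa using Nat.lt_succ_of_le (List.length_dropWhile_le _ _)

def get_datapoint_distribution_py_alt (handle_forces : List (List Int)) : List (Int × Int) :=
  if handle_forces = [] then []
  else
    let lengths := PySem.List.sorted (handle_forces.map (fun forces => (forces.length : Int))) (fun v => v) false
    pvRunsB lengths

-- ===== PRECONDITION & SPEC =====
def Spec_get_datapoint_distribution_py (handle_forces : List (List Int)) (out : List (Int × Int)) : Prop := out = get_datapoint_distribution_py_alt handle_forces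
instance (handle_forces : List (List Int)) (out : List (Int × Int)) : Decidable (Spec_get_datapoint_distribution_py handle_forces out) := by unfold Spec_get_datapoint_distribution_py; infer_instance

-- ===== CLAIM (what is proved, stated in full; the proofs are below) =====
def Claim_equal_get_datapoint_distribution_py : Prop := ∀ (handle_forces : List (List Int)), Dom_get_datapoint_distribution_py handle_forces → Spec_get_datapoint_distribution_py handle_forces (get_datapoint_distribution_py handle_forces)

-- ===== LEMMAS AND PROOFS =====


theorem pv_insertBy_congr {α : Type} (f g : α → α → Bool) (x : α) (ys : List α)
    (h : ∀ b ∈ ys, f x b = g x b) :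
    PySem.List.insertBy f x ys = PySem.List.insertBy g x ys := by
  induction ys with
  | nil => rfl
  | cons y ys ih =>
      have hy := h y (List.mem_cons_self ..)
      simp only [PySem.List.insertBy, hy]
      split
      · rfl
      · rw [ih (fun b hb => h b (List.mem_cons_of_mem _ hb))]

theorem pv_foldl_insertBy_lex (xs acc : List (Int × Int))
    (h : ((acc ++ xs).map Prod.fst).Nodup) :
    List.foldl (fun a p => PySem.List.insertBy
        (fun a b => decide (a.1 < b.1) || (!decide (b.1 < a.1) && decide (a.2 < b.2))) p a) acc xs
    = List.foldl (fun a p => PySem.List.insertBy (fun a b => decide (a.1 < b.1)) p a) acc xs := by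
  induction xs generalizing acc with
  | nil => rfl
  | cons x xs ih =>
      have hagree : ∀ b ∈ acc,
          (decide (x.1 < b.1) || (!decide (b.1 < x.1) && decide (x.2 < b.2))) = decide (x.1 < b.1) := by
        intro b hb
        have hne : b.1 ≠ x.1 := by
          -- nodup of map over acc ++ x :: xs separates b.1 (in acc part) from x.1
          have hnd := h
          rw [List.map_append] at hnd
          rcases (List.nodup_append.1 hnd) with ⟨_, _, hdisj⟩
          exact hdisj b.1 (List.mem_map_of_mem (f := Prod.fst) hb) x.1 (by simp)
        rcases lt_trichotomy x.1 b.1 with hlt | heq | hgt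
        · simp [hlt]
        · exact absurd heq.symm hne
        · simp [hgt, not_lt_of_gt hgt]
      have hstep : PySem.List.insertBy
          (fun a b => decide (a.1 < b.1) || (!decide (b.1 < a.1) && decide (a.2 < b.2))) x acc
          = PySem.List.insertBy (fun a b => decide (a.1 < b.1)) x acc :=
        pv_insertBy_congr _ _ _ _ hagree
      simp only [List.foldl_cons, hstep]
      apply ih
      have hperm : (PySem.List.insertBy (fun a b => decide (a.1 < b.1)) x acc).Perm (x :: acc) :=
        PySem.List.insertBy_perm ..
      have hperm2 : ((PySem.List.insertBy (fun a b => decide (a.1 < b.1)) x acc ++ xs).map Prod.fst).Perm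
          (((x :: acc) ++ xs).map Prod.fst) := (hperm.append_right xs).map _
      refine hperm2.nodup_iff.2 ?_
      have hp3 : ((acc ++ x :: xs).map Prod.fst).Perm (((x :: acc) ++ xs).map Prod.fst) := by
        refine List.Perm.map _ ?_
        have := List.perm_append_comm_assoc acc [x] xs
        simpa using this
      exact hp3.nodup_iff.1 h

theorem pvRunsB_spec (l : List Int) (h : l.Pairwise (· ≤ ·)) :
    (∀ p ∈ pvRunsB l, p.2 = (l.count p.1 : Int)) ∧
    (∀ k : Int, k ∈ (pvRunsB l).map Prod.fst ↔ k ∈ l) ∧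
    (pvRunsB l).Pairwise (fun a b => a.1 < b.1) := by
  induction l using pvRunsB.induct with
  | case1 => simp [pvRunsB]
  | case2 x xs ih =>
      set t := xs.takeWhile (fun y => y == x) with ht
      set d := xs.dropWhile (fun y => y == x) with hd
      have hxs : t ++ d = xs := List.takeWhile_append_dropWhile
      have htall : ∀ y ∈ t, y = x := by
        intro y hy
        have := List.mem_takeWhile_imp hy
        simpa using this
      have hxle : ∀ z ∈ xs, x ≤ z := by
        intro z hz; exact (List.pairwise_cons.1 h).1 z hz
      have hdsub : d.Sublist xs := List.dropWhile_sublist _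
      have hdsorted : d.Pairwise (· ≤ ·) := ((List.pairwise_cons.1 h).2).sublist hdsub
      have hdgt : ∀ z ∈ d, x < z := by
        intro z hz
        cases hdc : d with
        | nil => simp [hdc] at hz
        | cons z0 zs =>
            have hz0f : ¬ (z0 == x) = true := by
              have := List.head?_dropWhile_not (fun y => y == x) xs
              rw [← hd, hdc] at this
              simpa using this
            have hz0ne : z0 ≠ x := by simpa using hz0f
            have hz0mem : z0 ∈ xs := hdsub.mem (by simp [hdc])
            have hxz0 : x < z0 := lt_of_le_of_ne (hxle z0 hz0mem) (Ne.symm hz0ne)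
            rw [hdc] at hz
            rcases List.mem_cons.1 hz with rfl | hzs
            · exact hxz0
            · have : z0 ≤ z := by
                rw [hdc] at hdsorted
                exact (List.pairwise_cons.1 hdsorted).1 z hzs
              exact lt_of_lt_of_le hxz0 this
      have hxnd : x ∉ d := fun hx => absurd (hdgt x hx) (lt_irrefl x)
      obtain ⟨ih1, ih2, ih3⟩ := ih hdsorted
      have hcountt : ∀ k : Int, k ≠ x → t.count k = 0 := by
        intro k hk
        refine List.count_eq_zero.2 fun hkt => hk (htall k hkt)
      have hxcnt : (x :: xs).count x = 1 + t.length := by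
        rw [← hxs]
        have hct : List.count x t = t.length := List.count_eq_length.2 (fun y hy => ((htall y hy) : y = x) ▸ rfl)
        have hcd : List.count x d = 0 := List.count_eq_zero.2 hxnd
        simp [List.count_append, hct, hcd]
        omega
      refine ⟨?_, ?_, ?_⟩
      · intro p hp
        rw [pvRunsB] at hp
        rw [← ht, ← hd] at hp
        rcases List.mem_cons.1 hp with rfl | hp'
        · simp [hxcnt]
        · have hp1d : p.1 ∈ d := by
            have := (ih2 p.1).1 (List.mem_map_of_mem hp')
            exact this
          have hp1nx : p.1 ≠ x := fun he => hxnd (he ▸ hp1d)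
          have : (x :: xs).count p.1 = d.count p.1 := by
            rw [← hxs]
            simp [List.count_append, hcountt p.1 hp1nx, Ne.symm hp1nx]
          rw [this]
          exact ih1 p hp'
      · intro k
        rw [pvRunsB]
        rw [← ht, ← hd]
        simp only [List.map_cons, List.mem_cons, ih2]
        constructor
        · rintro (rfl | hkd)
          · simp
          · exact Or.inr (hdsub.mem hkd)
        · rintro (rfl | hkxs)
          · exact Or.inl rfl
          · rw [← hxs] at hkxs
            rcases List.mem_append.1 hkxs with hkt | hkd
            · exact Or.inl (htall k hkt)
            · exact Or.inr hkd
      · rw [pvRunsB]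
        rw [← ht, ← hd]
        refine List.pairwise_cons.2 ⟨?_, ih3⟩
        intro p hp
        exact hdgt p.1 ((ih2 p.1).1 (List.mem_map_of_mem hp))

-- the two insertion sorts of the ports, as folds (definitional)
theorem pv_sorted2_eq_foldl (xs : List (Int × Int)) :
    PySem.List.sorted2 xs (fun p => p.1) (fun p => p.2) false
    = xs.foldl (fun acc x => PySem.List.insertBy
        (fun a b => decide (a.1 < b.1) || (!decide (b.1 < a.1) && decide (a.2 < b.2))) x acc) [] := rfl

theorem pv_sorted_fst_eq_foldl (xs : List (Int × Int)) :
    PySem.List.sorted xs (fun p => p.1) false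
    = xs.foldl (fun acc x => PySem.List.insertBy (fun a b => decide (a.1 < b.1)) x acc) [] := rfl

-- main equivalence on the nonempty case, phrased over the list of lengths
theorem pv_main (counts : List Int) :
    PySem.List.sorted2 (PySem.Dict.counter counts).items (fun p => p.1) (fun p => p.2) false
    = pvRunsB (PySem.List.sorted counts (fun v => v) false) := by
  set l := PySem.List.sorted counts (fun v => v) false with hl
  set g : Int → Int × Int := fun k => (k, (List.count k counts : Int)) with hg
  have hitems : (PySem.Dict.counter counts).items = (PySem.Set.ofList counts).map g :=
    PySem.Dict.items_counter counts
  have hndfst : ((PySem.Dict.counter counts).items.map Prod.fst).Nodup := by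
    rw [hitems, List.map_map]
    have : (Prod.fst ∘ g) = id := by funext k; rfl
    rw [this, List.map_id]
    exact PySem.Set.nodup_ofList counts
  have hlsorted : l.Pairwise (· ≤ ·) := by
    simp only [hl]
    exact PySem.List.sorted_pairwise counts (fun v => v)
  have hlperm : l.Perm counts := PySem.List.sorted_perm counts (fun v => v) false
  obtain ⟨h1, h2, h3⟩ := pvRunsB_spec l hlsorted
  -- each run tuple is (value, multiplicity in counts)
  have e1 : pvRunsB l = ((pvRunsB l).map Prod.fst).map g := by
    rw [List.map_map]
    symm
    have hpt : ∀ p ∈ pvRunsB l, (g ∘ Prod.fst) p = id p := by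
      intro p hp
      have hc : List.count p.1 l = List.count p.1 counts := hlperm.count_eq p.1
      have h1p := h1 p hp
      simp only [hg, Function.comp_apply, id]
      rw [← hc, ← h1p]
    rw [List.map_congr_left hpt, List.map_id]
  -- the run values are exactly the distinct values of counts
  have hnd1 : ((pvRunsB l).map Prod.fst).Nodup := by
    have hpw : ((pvRunsB l).map Prod.fst).Pairwise (· < ·) :=
      (List.pairwise_map (f := Prod.fst) (R := (· < ·))).2 h3
    exact hpw.imp (fun h => ne_of_lt h)
  have hperm2 : ((pvRunsB l).map Prod.fst).Perm (PySem.Set.ofList counts) := by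
    refine (List.perm_ext_iff_of_nodup hnd1 (PySem.Set.nodup_ofList counts)).2 ?_
    intro k
    rw [h2 k, PySem.Set.mem_ofList]
    exact hlperm.mem_iff
  have hperm : (pvRunsB l).Perm (PySem.Dict.counter counts).items := by
    rw [hitems, e1]
    exact hperm2.map g
  -- conclusion: the lexicographic sort of the items is exactly the run list
  have hstep1 : PySem.List.sorted2 (PySem.Dict.counter counts).items (fun p => p.1) (fun p => p.2) false
      = PySem.List.sorted (PySem.Dict.counter counts).items (fun p => p.1) false := by
    rw [pv_sorted2_eq_foldl, pv_sorted_fst_eq_foldl]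
    exact pv_foldl_insertBy_lex _ [] (by simpa using hndfst)
  rw [hstep1]
  exact PySem.List.sorted_eq_of_perm_of_pairwise_lt _ _ _ hperm h3

-- ===== VERDICT (by name: the statement is the Claim_ definition above) =====
theorem get_datapoint_distribution_py_spec : Claim_equal_get_datapoint_distribution_py := by
  intro handle_forces _
  unfold Spec_get_datapoint_distribution_py get_datapoint_distribution_py get_datapoint_distribution_py_alt
  by_cases hnil : handle_forces = []
  · simp [hnil]
  · simp only [hnil, if_false]
    exact pv_main _
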